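-- pv_equiv track=rewrite | github.com/tamnguyen98/Python-Coding | WAH-compression-study/Main.py | convToBitmap
-- ===== SOURCE A (Python) =====
-- def convToBitmap(dbTuple):
--     data = dbTuple.split(',')
--     bitmap = ""
--
--     # Determine animal
--     if (data[0].lower() == "cat"):
--         bitmap = "1000"
--     elif (data[0].lower() == "dog"):
--         bitmap = "0100"
--     elif (data[0].lower() == "turtle"):
--         bitmap = "0010"
--     elif (data[0].lower() == "bird"):
--         bitmap = "0001"
--
--     # Determine
--     age = ""
--     tmpMax =int(data[1]) # Determine where to set 1. It will give us a decimal
--     for i in range(1,101, 10):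
--         if (tmpMax < i+10 and tmpMax >= i):
--             age += '1'
--         else:
--             age += '0'
--     bitmap += age # Concat those two
--
--     if (data[2].lower() == "false"):
--         bitmap += "01"
--     else:
--         bitmap += "10"
--
--     return bitmap+'\n'
-- ===== SOURCE B (Python) =====
-- _ANIMAL = {"cat": "1000", "dog": "0100", "turtle": "0010", "bird": "0001"}
--
-- def convToBitmap(dbTuple):
--     data = dbTuple.split(',')
--     animal = _ANIMAL.get(data[0].lower(), "")
--     tmpMax = int(data[1])
--     if 1 <= tmpMax <= 100:
--         pos = (tmpMax - 1) // 10
--         age = '0' * pos + '1' + '0' * (9 - pos)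
--     else:
--         age = '0' * 10
--     flag = "01" if data[2].lower() == "false" else "10"
--     return animal + age + flag + '\n'
-- ===== Notes on version B (the rewrite author's own statement) =====
-- stated objective: simpler
-- what changed: The 10-iteration bucket-scanning age loop is replaced by a closed-form one-hot position ((age-1)//10 for ages 1..100) and the animal if-chain by a dict lookup.
import Mathlib
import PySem

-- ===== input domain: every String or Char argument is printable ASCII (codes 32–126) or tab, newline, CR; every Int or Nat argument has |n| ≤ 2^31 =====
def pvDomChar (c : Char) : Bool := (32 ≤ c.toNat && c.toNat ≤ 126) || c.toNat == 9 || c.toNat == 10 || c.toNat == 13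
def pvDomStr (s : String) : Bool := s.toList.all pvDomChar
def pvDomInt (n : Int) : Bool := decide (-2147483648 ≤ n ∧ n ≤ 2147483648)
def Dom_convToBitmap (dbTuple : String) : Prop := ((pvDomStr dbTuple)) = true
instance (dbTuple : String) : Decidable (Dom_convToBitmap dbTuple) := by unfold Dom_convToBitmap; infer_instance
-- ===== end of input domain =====

-- B replaces the fixed 10-iteration age-bucket scan by a closed-form one-hot position
-- and the animal if-chain by a dict lookup (objective: simpler).

-- ===== PORT A =====
def convToBitmap (dbTuple : String) : String :=
  let data := (PySem.Str.split? dbTuple ",").getD []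
  let bitmap : List Char :=
    if PySem.Str.lower ((PySem.List.pyGet? data 0).getD "") = "cat" then ['1','0','0','0']
    else if PySem.Str.lower ((PySem.List.pyGet? data 0).getD "") = "dog" then ['0','1','0','0']
    else if PySem.Str.lower ((PySem.List.pyGet? data 0).getD "") = "turtle" then ['0','0','1','0']
    else if PySem.Str.lower ((PySem.List.pyGet? data 0).getD "") = "bird" then ['0','0','0','1']
    else []
  let tmpMax : Int := (PySem.Int.ofStr? ((PySem.List.pyGet? data 1).getD "")).getD 0
  let age : List Char := (PySem.List.pyRange 1 101 10).foldl
    (fun acc i => if tmpMax < i + 10 ∧ tmpMax ≥ i then acc ++ ['1'] else acc ++ ['0']) []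
  let bitmap := bitmap ++ age
  let bitmap := bitmap ++
    (if PySem.Str.lower ((PySem.List.pyGet? data 2).getD "") = "false" then ['0','1'] else ['1','0'])
  String.ofList (bitmap ++ ['\n'])

-- ===== PORT B =====
def pvAnimalMap : PySem.Dict String (List Char) :=
  PySem.Dict.ofList [("cat", ['1','0','0','0']), ("dog", ['0','1','0','0']),
                     ("turtle", ['0','0','1','0']), ("bird", ['0','0','0','1'])]

def convToBitmap_alt (dbTuple : String) : String :=
  let data := (PySem.Str.split? dbTuple ",").getD []
  let animal := PySem.Dict.getD pvAnimalMap (PySem.Str.lower ((PySem.List.pyGet? data 0).getD "")) []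
  let tmpMax : Int := (PySem.Int.ofStr? ((PySem.List.pyGet? data 1).getD "")).getD 0
  let age : List Char :=
    if 1 ≤ tmpMax ∧ tmpMax ≤ 100 then
      let pos := (PySem.Int.floordiv (tmpMax - 1) 10).toNat
      List.replicate pos '0' ++ ['1'] ++ List.replicate (9 - pos) '0'
    else List.replicate 10 '0'
  let flag : List Char :=
    if PySem.Str.lower ((PySem.List.pyGet? data 2).getD "") = "false" then ['0','1'] else ['1','0']
  String.ofList (animal ++ age ++ flag ++ ['\n'])

-- ===== PRECONDITION & SPEC =====
-- Pre_ excludes exactly the inputs where A raises: fewer than 3 comma-separated fields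
-- (IndexError) or a second field that int() rejects (ValueError).
def Pre_convToBitmap (dbTuple : String) : Prop :=
  3 ≤ ((PySem.Str.split? dbTuple ",").getD []).length ∧
  (PySem.Int.ofStr? ((PySem.List.pyGet? ((PySem.Str.split? dbTuple ",").getD []) 1).getD "")).isSome = true
instance (dbTuple : String) : Decidable (Pre_convToBitmap dbTuple) := by
  unfold Pre_convToBitmap; infer_instance

def pvWitness_convToBitmap : String := "cat,5,true"

def Spec_convToBitmap (dbTuple : String) (out : String) : Prop := out = convToBitmap_alt dbTuple
instance (dbTuple : String) (out : String) : Decidable (Spec_convToBitmap dbTuple out) := by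
  unfold Spec_convToBitmap; infer_instance

-- ===== CLAIM (what is proved, stated in full; the proofs are below) =====
def Claim_equal_convToBitmap : Prop := ∀ (dbTuple : String), Dom_convToBitmap dbTuple → Pre_convToBitmap dbTuple → Spec_convToBitmap dbTuple (convToBitmap dbTuple)

-- ===== LEMMAS AND PROOFS =====

-- The animal if-chain equals the dict lookup, for any key.
theorem pv_animal_eq (s : String) :
    (if s = "cat" then ['1','0','0','0']
     else if s = "dog" then ['0','1','0','0']
     else if s = "turtle" then ['0','0','1','0']
     else if s = "bird" then ['0','0','0','1']
     else []) = PySem.Dict.getD pvAnimalMap s [] := by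
  have h : pvAnimalMap = PySem.Dict.mk [("cat", ['1','0','0','0']), ("dog", ['0','1','0','0']),
      ("turtle", ['0','0','1','0']), ("bird", ['0','0','0','1'])] := by decide
  rw [h]
  simp only [PySem.Dict.getD, PySem.Dict.get?]
  have h1 : ("cat" == s) = decide (s = "cat") := by rw [Bool.beq_comm]; simp [BEq.beq]
  have h2 : ("dog" == s) = decide (s = "dog") := by rw [Bool.beq_comm]; simp [BEq.beq]
  have h3 : ("turtle" == s) = decide (s = "turtle") := by rw [Bool.beq_comm]; simp [BEq.beq]
  have h4 : ("bird" == s) = decide (s = "bird") := by rw [Bool.beq_comm]; simp [BEq.beq]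
  by_cases c1 : s = "cat" <;> by_cases c2 : s = "dog" <;> by_cases c3 : s = "turtle" <;>
    by_cases c4 : s = "bird" <;> simp [List.find?, h1, h2, h3, h4, c1, c2, c3, c4]

-- The 10-step bucket scan equals the closed-form one-hot segment, for any age.
theorem pv_age_eq (t : Int) :
    (PySem.List.pyRange 1 101 10).foldl
      (fun acc i => if t < i + 10 ∧ t ≥ i then acc ++ ['1'] else acc ++ ['0']) [] =
    (if 1 ≤ t ∧ t ≤ 100 then
      List.replicate (PySem.Int.floordiv (t - 1) 10).toNat '0' ++ ['1'] ++
        List.replicate (9 - (PySem.Int.floordiv (t - 1) 10).toNat) '0'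
     else List.replicate 10 '0') := by
  have hr : PySem.List.pyRange 1 101 10 = [1, 11, 21, 31, 41, 51, 61, 71, 81, 91] := by decide
  rw [hr]
  by_cases h : 1 ≤ t ∧ t ≤ 100
  · obtain ⟨h1, h2⟩ := h
    interval_cases t <;> decide
  · rw [if_neg h]
    simp only [List.foldl]
    rw [if_neg (show ¬((t:Int) < 1 + 10 ∧ t ≥ 1) by omega),
        if_neg (show ¬((t:Int) < 11 + 10 ∧ t ≥ 11) by omega),
        if_neg (show ¬((t:Int) < 21 + 10 ∧ t ≥ 21) by omega),
        if_neg (show ¬((t:Int) < 31 + 10 ∧ t ≥ 31) by omega),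
        if_neg (show ¬((t:Int) < 41 + 10 ∧ t ≥ 41) by omega),
        if_neg (show ¬((t:Int) < 51 + 10 ∧ t ≥ 51) by omega),
        if_neg (show ¬((t:Int) < 61 + 10 ∧ t ≥ 61) by omega),
        if_neg (show ¬((t:Int) < 71 + 10 ∧ t ≥ 71) by omega),
        if_neg (show ¬((t:Int) < 81 + 10 ∧ t ≥ 81) by omega),
        if_neg (show ¬((t:Int) < 91 + 10 ∧ t ≥ 91) by omega)]
    rfl

-- ===== VERDICT (by name: the statement is the Claim_ definition above) =====
set_option maxHeartbeats 2000000 in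
theorem convToBitmap_spec : Claim_equal_convToBitmap := by
  intro dbTuple _ _
  unfold Spec_convToBitmap convToBitmap convToBitmap_alt
  simp only [pv_animal_eq, pv_age_eq, List.append_assoc]
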